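-- pv_equiv track=rewrite | github.com/durrantmm/mustache | mustache/alignment_tools.py | left_alignment_score
-- ===== SOURCE A (Python) =====
-- def left_alignment_score(read1, read2):
--     score = 0
--     for i in range(min([len(read1), len(read2)])):
--         if read1[i] == read2[i]:
--             score += 1
--         else:
--             score -= 1
--
--     return (score)
-- ===== SOURCE B (Python) =====
-- def left_alignment_score(read1, read2):
--     # Divide-and-conquer over the index interval [lo, hi): split at the midpoint
--     # and add the scores of the two halves; a one-position interval scores +1/-1.
--     def go(lo, hi):
--         if hi <= lo:
--             return 0
--         if hi - lo == 1:
--             return 1 if read1[lo] == read2[lo] else -1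
--         mid = (lo + hi) // 2
--         return go(lo, mid) + go(mid, hi)
--     return go(0, min(len(read1), len(read2)))
-- ===== Notes on version B (the rewrite author's own statement) =====
-- stated objective: alternative
-- what changed: B replaces A's left-to-right index loop with a signed accumulator by a divide-and-conquer recursion that splits the index interval at its midpoint and sums the scores of the two halves (base case: one position scores +1/-1); correctness follows from associativity of addition over the positions.
import Mathlib
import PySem

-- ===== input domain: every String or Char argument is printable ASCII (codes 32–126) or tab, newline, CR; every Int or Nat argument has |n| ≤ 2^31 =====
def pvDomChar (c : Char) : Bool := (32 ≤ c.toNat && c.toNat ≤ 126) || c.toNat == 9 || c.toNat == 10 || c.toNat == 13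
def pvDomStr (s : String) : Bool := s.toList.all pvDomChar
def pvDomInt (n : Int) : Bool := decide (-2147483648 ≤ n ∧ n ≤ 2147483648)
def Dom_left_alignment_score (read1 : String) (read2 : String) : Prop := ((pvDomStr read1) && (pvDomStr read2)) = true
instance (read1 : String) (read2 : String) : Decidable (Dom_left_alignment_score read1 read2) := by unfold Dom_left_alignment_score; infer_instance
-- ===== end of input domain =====

-- B replaces A's left-to-right ±1 accumulator loop by a divide-and-conquer recursion
-- over index intervals (split at the midpoint, add the halves); objective: alternative.

-- ===== PORT A =====
-- A: score = 0; for i in range(min([len(read1), len(read2)])): score += 1 if read1[i] == read2[i] else -1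
def left_alignment_score (read1 : String) (read2 : String) : Int :=
  (PySem.List.pyRange 0 (min (PySem.Str.len read1) (PySem.Str.len read2)) 1).foldl
    (fun score i =>
      -- read1[i] == read2[i]; i is always in range here, so pyGetD is exact
      if PySem.List.pyGetD read1.toList i ' ' == PySem.List.pyGetD read2.toList i ' '
      then score + 1 else score - 1)
    0

-- ===== PORT B =====
-- B's inner 'go(lo, hi)': divide and conquer on the index interval [lo, hi).
-- Structural recursion on a fuel bound (fuel = interval length, a totality device only:
-- every child interval is strictly shorter, so the 0-fuel branch is never reached).
def pvGo (l1 l2 : List Char) : Nat → Int → Int → Int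
  | 0, _, _ => 0
  | fuel + 1, lo, hi =>
    if hi ≤ lo then 0
    else if hi - lo = 1 then
      (if PySem.List.pyGetD l1 lo ' ' == PySem.List.pyGetD l2 lo ' ' then 1 else -1)
    else
      -- mid = (lo + hi) // 2
      pvGo l1 l2 fuel lo (PySem.Int.floordiv (lo + hi) 2) +
      pvGo l1 l2 fuel (PySem.Int.floordiv (lo + hi) 2) hi

-- B: return go(0, min(len(read1), len(read2)))
def left_alignment_score_alt (read1 : String) (read2 : String) : Int :=
  pvGo read1.toList read2.toList
    (min (PySem.Str.len read1) (PySem.Str.len read2)).toNat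
    0 (min (PySem.Str.len read1) (PySem.Str.len read2))

-- ===== PRECONDITION & SPEC =====
def Spec_left_alignment_score (read1 : String) (read2 : String) (out : Int) : Prop := out = left_alignment_score_alt read1 read2
instance (read1 : String) (read2 : String) (out : Int) : Decidable (Spec_left_alignment_score read1 read2 out) := by unfold Spec_left_alignment_score; infer_instance

-- ===== CLAIM (what is proved, stated in full; the proofs are below) =====
def Claim_equal_left_alignment_score : Prop := ∀ (read1 : String) (read2 : String), Dom_left_alignment_score read1 read2 → Spec_left_alignment_score read1 read2 (left_alignment_score read1 read2)

-- ===== LEMMAS AND PROOFS =====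

-- With enough fuel, the divide-and-conquer recursion sums the per-position ±1 contributions over [lo, hi).
lemma pvGo_eq_sum (l1 l2 : List Char) (fuel : Nat) (lo hi : Int) (hf : (hi - lo).toNat ≤ fuel) :
    pvGo l1 l2 fuel lo hi
      = ((PySem.List.pyRange lo hi 1).map
          (fun i => if PySem.List.pyGetD l1 i ' ' == PySem.List.pyGetD l2 i ' '
                    then (1 : Int) else -1)).sum := by
  induction fuel generalizing lo hi with
  | zero =>
    have h0 : hi ≤ lo := by omega
    rw [PySem.List.pyRange_one_eq_nil h0]; simp [pvGo]
  | succ f ih =>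
    by_cases h0 : hi ≤ lo
    · rw [PySem.List.pyRange_one_eq_nil h0]; simp [pvGo, h0]
    · by_cases h1 : hi - lo = 1
      · have : hi = lo + 1 := by omega
        subst this
        rw [PySem.List.pyRange_one_singleton]
        simp [pvGo, h0, h1]
      · have hediv : PySem.Int.floordiv (lo + hi) 2 = (lo + hi) / 2 :=
          PySem.Int.floordiv_eq_ediv_of_pos (by omega)
        have hmid1 : lo ≤ PySem.Int.floordiv (lo + hi) 2 := by rw [hediv]; omega
        have hmid2 : PySem.Int.floordiv (lo + hi) 2 ≤ hi := by rw [hediv]; omega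
        have hlt1 : lo < PySem.Int.floordiv (lo + hi) 2 := by rw [hediv]; omega
        have hlt2 : PySem.Int.floordiv (lo + hi) 2 < hi := by rw [hediv]; omega
        have e1 := ih lo (PySem.Int.floordiv (lo + hi) 2) (by omega)
        have e2 := ih (PySem.Int.floordiv (lo + hi) 2) hi (by omega)
        simp only [pvGo, h0, h1, if_false, e1, e2]
        rw [PySem.List.pyRange_one_append lo (PySem.Int.floordiv (lo + hi) 2) hi hmid1 hmid2,
            List.map_append, List.sum_append]

-- A ±1 accumulator fold is the start value plus the sum of per-element ±1 contributions.
lemma pv_foldl_pm (f : Int → Bool) (xs : List Int) (s : Int) :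
    xs.foldl (fun acc i => if f i then acc + 1 else acc - 1) s
      = s + (xs.map (fun i => if f i then (1 : Int) else -1)).sum := by
  induction xs generalizing s with
  | nil => simp
  | cons h t ih =>
    simp only [List.foldl_cons, List.map_cons, List.sum_cons, ih]
    split_ifs <;> ring

-- ===== VERDICT (by name: the statement is the Claim_ definition above) =====
theorem left_alignment_score_spec : Claim_equal_left_alignment_score := by
  intro read1 read2 _
  unfold Spec_left_alignment_score left_alignment_score left_alignment_score_alt
  rw [pvGo_eq_sum _ _ _ _ _ (by omega),
      pv_foldl_pm (fun i => PySem.List.pyGetD read1.toList i ' ' == PySem.List.pyGetD read2.toList i ' ')]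
  simp
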